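-- pv_equiv track=rewrite | github.com/RobinSuxdorf/projektpraktikum-ws24-quality-of-wikipedia-articles | preserved_experiments/WordEncodeingBinaryRemade.py | create_word_list_with_all_categories
-- ===== SOURCE A (Python) =====
-- def create_word_list_with_all_categories(word_label_list):
--     """creates a lexicon with the words and all the articles they belong to"""
--     lexicon = {}
--     for word_label in word_label_list:
--         if word_label[0] in lexicon.keys():
--             x = lexicon[word_label[0]] + str(word_label[1])
--             lexicon[word_label[0]] = x
--         else:
--             lexicon[word_label[0]] = str(word_label[1])
--
--     return lexicon
-- ===== SOURCE B (Python) =====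
-- def create_word_list_with_all_categories(word_label_list):
--     """creates a lexicon with the words and all the articles they belong to"""
--     words = list(dict.fromkeys(word for word, _ in word_label_list))
--     return {
--         word: ''.join(str(label) for w, label in word_label_list if w == word)
--         for word in words
--     }
-- ===== Notes on version B (the rewrite author's own statement) =====
-- stated objective: alternative
-- what changed: B keeps no lexicon at all: it first extracts the distinct words in first-occurrence order, then for each word rescans the whole input list and joins the stringified labels, replacing A's single-pass dict-with-running-concatenation by a brute-force two-level scan.
import Mathlib
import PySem

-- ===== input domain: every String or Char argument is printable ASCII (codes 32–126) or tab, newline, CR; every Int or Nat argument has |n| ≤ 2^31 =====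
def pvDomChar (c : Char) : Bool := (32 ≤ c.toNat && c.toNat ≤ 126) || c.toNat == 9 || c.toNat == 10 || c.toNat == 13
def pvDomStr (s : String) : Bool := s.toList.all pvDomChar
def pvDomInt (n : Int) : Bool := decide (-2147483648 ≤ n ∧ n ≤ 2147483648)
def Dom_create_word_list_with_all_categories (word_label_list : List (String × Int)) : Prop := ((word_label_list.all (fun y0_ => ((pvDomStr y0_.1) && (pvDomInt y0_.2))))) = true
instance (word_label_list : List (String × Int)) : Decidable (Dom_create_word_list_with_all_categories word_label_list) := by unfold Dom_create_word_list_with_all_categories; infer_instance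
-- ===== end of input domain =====

-- B replaces A's single-pass lexicon of running concatenations by a distinct-word pass plus a
-- full rescan per word (alternative decomposition; not claimed faster).
-- ===== PORT A =====
-- literal port of A: one dict of running concatenated strings, membership-tested per element
def create_word_list_with_all_categories (word_label_list : List (String × Int)) : List (String × String) :=
  (word_label_list.foldl (fun lexicon word_label =>
      if lexicon.contains word_label.1 then
        -- x = lexicon[word_label[0]] + str(word_label[1]); lexicon[word_label[0]] = x
        lexicon.insert word_label.1 (lexicon.getD word_label.1 "" ++ PySem.Int.toStr word_label.2)
      else
        lexicon.insert word_label.1 (PySem.Int.toStr word_label.2))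
    PySem.Dict.empty).items

-- ===== PORT B =====
-- B: words = list(dict.fromkeys(...)); then per word, rescan the list and join the labels.
def create_word_list_with_all_categories_alt (word_label_list : List (String × Int)) : List (String × String) :=
  let words := PySem.List.dedup (word_label_list.map (fun p => p.1))
  words.map (fun word =>
    (word, PySem.Str.join ""
      ((word_label_list.filter (fun p => p.1 == word)).map (fun p => PySem.Int.toStr p.2))))

-- ===== PRECONDITION & SPEC =====
def Spec_create_word_list_with_all_categories (word_label_list : List (String × Int)) (out : List (String × String)) : Prop := out = create_word_list_with_all_categories_alt word_label_list
instance (word_label_list : List (String × Int)) (out : List (String × String)) : Decidable (Spec_create_word_list_with_all_categories word_label_list out) := by unfold Spec_create_word_list_with_all_categories; infer_instance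

-- ===== CLAIM =====
def Claim_equal_create_word_list_with_all_categories : Prop := ∀ (word_label_list : List (String × Int)), Dom_create_word_list_with_all_categories word_label_list → Spec_create_word_list_with_all_categories word_label_list (create_word_list_with_all_categories word_label_list)

-- ===== LEMMAS AND PROOFS =====

-- ''.join over strings is flatten on the char level
lemma chars_join_nil (xs : List (List Char)) : PySem.Chars.join [] xs = xs.flatten := by
  induction xs with
  | nil => simp [PySem.Chars.join, List.intercalate]
  | cons h t ih => cases t <;> simp_all [PySem.Chars.join, List.intercalate, List.intersperse]

lemma str_join_nil_cons (x : String) (xs : List String) :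
    PySem.Str.join "" (x :: xs) = x ++ PySem.Str.join "" xs := by
  simp [PySem.Str.join, chars_join_nil, String.ofList_append]

-- A's loop body is an unconditional insert of the extended value
lemma stepA_eq (d : PySem.Dict String String) (p : String × Int) :
    (if d.contains p.1 then
        d.insert p.1 (d.getD p.1 "" ++ PySem.Int.toStr p.2)
      else d.insert p.1 (PySem.Int.toStr p.2))
    = d.insert p.1 (d.getD p.1 "" ++ PySem.Int.toStr p.2) := by
  by_cases h : d.contains p.1 = true
  · simp [h]
  · simp only [Bool.not_eq_true] at h
    rw [PySem.Dict.getD_of_not_contains (h := h)]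
    simp

-- running concatenation in A's dict = join of the per-key stringified labels
lemma getD_foldA (l : List (String × Int)) (d : PySem.Dict String String) (c : String) :
    (l.foldl (fun d p => d.insert p.1 (d.getD p.1 "" ++ PySem.Int.toStr p.2)) d).getD c ""
      = d.getD c "" ++ PySem.Str.join "" ((l.filter (fun p => p.1 == c)).map (fun p => PySem.Int.toStr p.2)) := by
  induction l generalizing d with
  | nil => simp [PySem.Str.join]
  | cons p t ih =>
    simp only [List.foldl_cons, ih, List.filter_cons]
    by_cases h : p.1 = c
    · simp [h, str_join_nil_cons, String.append_assoc]
    · have hpc : (p.1 == c) = false := by simp [h]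
      simp only [hpc, PySem.Dict.getD_insert]
      rw [if_neg (fun hc => h hc.symm)]
      simp

-- ===== VERDICT =====
theorem create_word_list_with_all_categories_spec : Claim_equal_create_word_list_with_all_categories := by
  intro wl _
  unfold Spec_create_word_list_with_all_categories
  unfold create_word_list_with_all_categories create_word_list_with_all_categories_alt
  have hA : wl.foldl (fun lexicon word_label =>
      if lexicon.contains word_label.1 then
        lexicon.insert word_label.1 (lexicon.getD word_label.1 "" ++ PySem.Int.toStr word_label.2)
      else lexicon.insert word_label.1 (PySem.Int.toStr word_label.2)) PySem.Dict.empty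
      = wl.foldl (fun d p => d.insert p.1 (d.getD p.1 "" ++ PySem.Int.toStr p.2)) PySem.Dict.empty := by
    congr 1
    funext d p
    exact stepA_eq d p
  rw [hA]
  set dA := wl.foldl (fun d p => d.insert p.1 (d.getD p.1 "" ++ PySem.Int.toStr p.2)) PySem.Dict.empty with hdA
  have hndA : dA.keys.Nodup := by
    rw [hdA]
    exact PySem.Dict.nodup_keys_foldl_insert_key wl (fun p => p.1) _ _ PySem.Dict.nodup_keys_empty
  have hkeys : dA.keys = PySem.List.dedup (wl.map (fun p => p.1)) := by
    rw [hdA, PySem.Dict.keys_foldl_insert_key]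
    simp [PySem.Set.update_nil_left, PySem.Dict.empty]
  rw [PySem.Dict.items_eq_map_keys dA hndA "", hkeys]
  refine List.map_congr_left ?_
  intro k _
  rw [hdA, getD_foldA]
  simp
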